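-- pv_equiv track=rewrite | github.com/otovic/MET-SI-Materijali | 2. Godina/CS230 - Distribuirani sistemi/Domaci/CS230-DZ09-PetarOtovic5460/Nivo1/Zadatak.py | find_course_path
-- ===== SOURCE A (Python) =====
-- courses = {
--     "SOFTVERSKO INŽENJERSTVO": {
--         1: {
--             1: {
--                 "CS101": "Uvod u programiranje",
--                 "CS102": "Osnove računarskih nauka",
--             },
--             2: {
--                 "CS103": "Algoritmi i strukture podataka",
--                 "CS104": "Diskretna matematika",
--             },
--         },
--         2: {
--             3: {
--                 "CS201": "Objektno orijentisano programiranje",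
--                 "CS202": "Baze podataka",
--             },
--             4: {
--                 "CS230": "Distribuirani sistemi",
--                 "CS204": "Operativni sistemi",
--             },
--         },
--     },
--     "INFORMACIONE TEHNOLOGIJE": {
--         1: {
--             1: {
--                 "IT101": "Osnove informacionih tehnologija",
--                 "IT102": "Računarske mreže",
--             },
--             2: {
--                 "IT103": "Sigurnost informacionih sistema",
--                 "IT104": "Skladišta podataka",
--             },
--         },
--         2: {
--             3: {
--                 "IT201": "Napredne mreže",
--                 "IT202": "Cloud computing",
--             },
--             4: {
--                 "IT230": "Big Data",
--                 "IT204": "IoT tehnologije",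
--             },
--         },
--     }
-- }
--
-- def find_course_path(course_code):
--     for smer, years in courses.items():
--         for year, semesters in years.items():
--             for semester, subjects in semesters.items():
--                 if course_code in subjects:
--                     course_name = subjects[course_code]
--                     return f"{smer} > Godina #{year} > Semestar #{semester} > {course_code} - {course_name}"
--     return "Course code not found"
-- ===== SOURCE B (Python) =====
-- # B: flat precomputed table of (code, smer, year, semester, name) records,
-- # one linear scan instead of three nested dict loops.
-- _FLAT = [
--     ("CS101", "SOFTVERSKO IN\u017dENJERSTVO", 1, 1, "Uvod u programiranje"),
--     ("CS102", "SOFTVERSKO IN\u017dENJERSTVO", 1, 1, "Osnove ra\u010dunarskih nauka"),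
--     ("CS103", "SOFTVERSKO IN\u017dENJERSTVO", 1, 2, "Algoritmi i strukture podataka"),
--     ("CS104", "SOFTVERSKO IN\u017dENJERSTVO", 1, 2, "Diskretna matematika"),
--     ("CS201", "SOFTVERSKO IN\u017dENJERSTVO", 2, 3, "Objektno orijentisano programiranje"),
--     ("CS202", "SOFTVERSKO IN\u017dENJERSTVO", 2, 3, "Baze podataka"),
--     ("CS230", "SOFTVERSKO IN\u017dENJERSTVO", 2, 4, "Distribuirani sistemi"),
--     ("CS204", "SOFTVERSKO IN\u017dENJERSTVO", 2, 4, "Operativni sistemi"),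
--     ("IT101", "INFORMACIONE TEHNOLOGIJE", 1, 1, "Osnove informacionih tehnologija"),
--     ("IT102", "INFORMACIONE TEHNOLOGIJE", 1, 1, "Ra\u010dunarske mre\u017ee"),
--     ("IT103", "INFORMACIONE TEHNOLOGIJE", 1, 2, "Sigurnost informacionih sistema"),
--     ("IT104", "INFORMACIONE TEHNOLOGIJE", 1, 2, "Skladi\u0161ta podataka"),
--     ("IT201", "INFORMACIONE TEHNOLOGIJE", 2, 3, "Napredne mre\u017ee"),
--     ("IT202", "INFORMACIONE TEHNOLOGIJE", 2, 3, "Cloud computing"),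
--     ("IT230", "INFORMACIONE TEHNOLOGIJE", 2, 4, "Big Data"),
--     ("IT204", "INFORMACIONE TEHNOLOGIJE", 2, 4, "IoT tehnologije"),
-- ]
--
-- def find_course_path(course_code):
--     for code, smer, year, semester, name in _FLAT:
--         if code == course_code:
--             return f"{smer} > Godina #{year} > Semestar #{semester} > {course_code} - {name}"
--     return "Course code not found"
-- ===== Notes on version B (the rewrite author's own statement) =====
-- stated objective: simpler
-- what changed: B replaces A's nested dict-of-dicts and triple nested loop by a flat precomputed table of (code, smer, year, semester, name) records searched with one linear scan; same order as A's traversal, so first-match and the not-found default coincide.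
import Mathlib
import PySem

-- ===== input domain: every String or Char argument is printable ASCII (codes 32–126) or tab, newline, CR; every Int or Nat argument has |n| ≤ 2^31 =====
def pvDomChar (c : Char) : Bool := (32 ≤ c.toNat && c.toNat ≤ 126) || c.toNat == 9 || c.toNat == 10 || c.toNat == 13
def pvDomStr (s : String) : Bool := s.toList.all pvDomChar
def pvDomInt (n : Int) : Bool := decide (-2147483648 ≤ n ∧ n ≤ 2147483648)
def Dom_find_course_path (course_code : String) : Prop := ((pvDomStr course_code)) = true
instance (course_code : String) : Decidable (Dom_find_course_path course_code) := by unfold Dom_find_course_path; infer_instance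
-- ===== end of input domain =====

-- B replaces A's nested dict-of-dicts and triple nested loop by a flat table of
-- (code, smer, year, semester, name) records with one linear scan (objective: simpler).

-- ===== PORT A =====  (the nested `courses` dict and the triple nested loop with early return)
def coursesData : List (String × List (Int × List (Int × List (String × String)))) :=
  [ ("SOFTVERSKO INŽENJERSTVO",
      [ (1, [ (1, [("CS101", "Uvod u programiranje"), ("CS102", "Osnove računarskih nauka")]),
              (2, [("CS103", "Algoritmi i strukture podataka"), ("CS104", "Diskretna matematika")]) ]),
        (2, [ (3, [("CS201", "Objektno orijentisano programiranje"), ("CS202", "Baze podataka")]),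
              (4, [("CS230", "Distribuirani sistemi"), ("CS204", "Operativni sistemi")]) ]) ]),
    ("INFORMACIONE TEHNOLOGIJE",
      [ (1, [ (1, [("IT101", "Osnove informacionih tehnologija"), ("IT102", "Računarske mreže")]),
              (2, [("IT103", "Sigurnost informacionih sistema"), ("IT104", "Skladišta podataka")]) ]),
        (2, [ (3, [("IT201", "Napredne mreže"), ("IT202", "Cloud computing")]),
              (4, [("IT230", "Big Data"), ("IT204", "IoT tehnologije")]) ]) ]) ]

-- dict membership test + indexing: first-match association lookup (exact for a Python dict)
def assocGet? {α : Type} (xs : List (String × α)) (c : String) : Option α :=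
  match xs with
  | [] => none
  | (k, v) :: rest => if k == c then some v else assocGet? rest c

def loopSem (c smer : String) (year : Int) : List (Int × List (String × String)) → Option String
  | [] => none
  | (semester, subjects) :: rest =>
    match assocGet? subjects c with
    | some name =>
        some (smer ++ " > Godina #" ++ PySem.Int.toStr year ++ " > Semestar #" ++
              PySem.Int.toStr semester ++ " > " ++ c ++ " - " ++ name)
    | none => loopSem c smer year rest

def loopYear (c smer : String) : List (Int × List (Int × List (String × String))) → Option String
  | [] => none
  | (year, semesters) :: rest =>
    match loopSem c smer year semesters with
    | some s => some s
    | none => loopYear c smer rest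

def loopSmer (c : String) : List (String × List (Int × List (Int × List (String × String)))) → Option String
  | [] => none
  | (smer, years) :: rest =>
    match loopYear c smer years with
    | some s => some s
    | none => loopSmer c rest

def find_course_path (course_code : String) : String :=
  match loopSmer course_code coursesData with
  | some s => s
  | none => "Course code not found"

-- ===== PORT B =====  (flat record table `_FLAT` and one scan over it)
def flatCourses : List (String × String × Int × Int × String) :=
  [ ("CS101", "SOFTVERSKO INŽENJERSTVO", 1, 1, "Uvod u programiranje"),
    ("CS102", "SOFTVERSKO INŽENJERSTVO", 1, 1, "Osnove računarskih nauka"),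
    ("CS103", "SOFTVERSKO INŽENJERSTVO", 1, 2, "Algoritmi i strukture podataka"),
    ("CS104", "SOFTVERSKO INŽENJERSTVO", 1, 2, "Diskretna matematika"),
    ("CS201", "SOFTVERSKO INŽENJERSTVO", 2, 3, "Objektno orijentisano programiranje"),
    ("CS202", "SOFTVERSKO INŽENJERSTVO", 2, 3, "Baze podataka"),
    ("CS230", "SOFTVERSKO INŽENJERSTVO", 2, 4, "Distribuirani sistemi"),
    ("CS204", "SOFTVERSKO INŽENJERSTVO", 2, 4, "Operativni sistemi"),
    ("IT101", "INFORMACIONE TEHNOLOGIJE", 1, 1, "Osnove informacionih tehnologija"),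
    ("IT102", "INFORMACIONE TEHNOLOGIJE", 1, 1, "Računarske mreže"),
    ("IT103", "INFORMACIONE TEHNOLOGIJE", 1, 2, "Sigurnost informacionih sistema"),
    ("IT104", "INFORMACIONE TEHNOLOGIJE", 1, 2, "Skladišta podataka"),
    ("IT201", "INFORMACIONE TEHNOLOGIJE", 2, 3, "Napredne mreže"),
    ("IT202", "INFORMACIONE TEHNOLOGIJE", 2, 3, "Cloud computing"),
    ("IT230", "INFORMACIONE TEHNOLOGIJE", 2, 4, "Big Data"),
    ("IT204", "INFORMACIONE TEHNOLOGIJE", 2, 4, "IoT tehnologije") ]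

def scanFlat (course_code : String) : List (String × String × Int × Int × String) → String
  | [] => "Course code not found"
  | (code, smer, year, semester, name) :: rows =>
    if code == course_code then
      smer ++ " > Godina #" ++ PySem.Int.toStr year ++ " > Semestar #" ++
        PySem.Int.toStr semester ++ " > " ++ course_code ++ " - " ++ name
    else scanFlat course_code rows

def find_course_path_alt (course_code : String) : String :=
  scanFlat course_code flatCourses

-- ===== PRECONDITION & SPEC =====
def Spec_find_course_path (course_code : String) (out : String) : Prop := out = find_course_path_alt course_code
instance (course_code : String) (out : String) : Decidable (Spec_find_course_path course_code out) := by unfold Spec_find_course_path; infer_instance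

-- ===== CLAIM (what is proved, stated in full; the proofs are below) =====
def Claim_equal_find_course_path : Prop := ∀ (course_code : String), Dom_find_course_path course_code → Spec_find_course_path course_code (find_course_path course_code)

-- ===== LEMMAS AND PROOFS =====

-- ===== VERDICT (by name: the statement is the Claim_ definition above) =====
theorem find_course_path_spec : Claim_equal_find_course_path := by
  intro c _
  show find_course_path c = find_course_path_alt c
  by_cases h1 : "CS101" = c
  · subst h1; decide
  by_cases h2 : "CS102" = c
  · subst h2; decide
  by_cases h3 : "CS103" = c
  · subst h3; decide
  by_cases h4 : "CS104" = c
  · subst h4; decide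
  by_cases h5 : "CS201" = c
  · subst h5; decide
  by_cases h6 : "CS202" = c
  · subst h6; decide
  by_cases h7 : "CS230" = c
  · subst h7; decide
  by_cases h8 : "CS204" = c
  · subst h8; decide
  by_cases h9 : "IT101" = c
  · subst h9; decide
  by_cases h10 : "IT102" = c
  · subst h10; decide
  by_cases h11 : "IT103" = c
  · subst h11; decide
  by_cases h12 : "IT104" = c
  · subst h12; decide
  by_cases h13 : "IT201" = c
  · subst h13; decide
  by_cases h14 : "IT202" = c
  · subst h14; decide
  by_cases h15 : "IT230" = c
  · subst h15; decide
  by_cases h16 : "IT204" = c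
  · subst h16; decide
  simp [find_course_path, find_course_path_alt, coursesData, flatCourses,
        loopSmer, loopYear, loopSem, assocGet?, scanFlat,
        h1, h2, h3, h4, h5, h6, h7, h8, h9, h10, h11, h12, h13, h14, h15, h16]
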